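-- pv_equiv track=rewrite | github.com/vsmirn0v/KaChat | scripts/split_chatservice_v2.py | compute_brace_depths
-- ===== SOURCE A (Python) =====
-- def compute_brace_depths(lines):
--     """Compute brace depth at the END of each line, handling strings and comments."""
--     depths = []
--     depth = 0
--     in_block_comment = False
--
--     for line in lines:
--         i = 0
--         s = line
--         while i < len(s):
--             if in_block_comment:
--                 if s[i:i+2] == '*/':
--                     in_block_comment = False
--                     i += 2
--                     continue
--                 i += 1
--                 continue
--
--             ch = s[i]
--
--             # Block comment start
--             if s[i:i+2] == '/*':
--                 in_block_comment = True
--                 i += 2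
--                 continue
--
--             # Line comment - skip rest
--             if s[i:i+2] == '//':
--                 break
--
--             # String literal (double-quoted)
--             if ch == '"':
--                 # Check for multi-line string """
--                 if s[i:i+3] == '"""':
--                     i += 3
--                     while i < len(s):
--                         if s[i:i+3] == '"""':
--                             i += 3
--                             break
--                         if s[i] == '\\':
--                             i += 2
--                             continue
--                         i += 1
--                     continue
--                 # Regular string
--                 i += 1
--                 while i < len(s):
--                     if s[i] == '\\':
--                         i += 2
--                         continue
--                     if s[i] == '"':
--                         i += 1
--                         break
--                     i += 1
--                 continue
--
--             if ch == '{':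
--                 depth += 1
--             elif ch == '}':
--                 depth -= 1
--
--             i += 1
--
--         depths.append(depth)
--
--     return depths
-- ===== SOURCE B (Python) =====
-- def compute_brace_depths(lines):
--     """Flat per-character state machine (NORMAL/STRING/TRIPLE/BLOCK) instead of
--     nested inner while-loops; only the block-comment state survives line breaks."""
--     NORMAL, STRING, TRIPLE, BLOCK = 0, 1, 2, 3
--     depths = []
--     depth = 0
--     in_block = False
--     for s in lines:
--         n = len(s)
--         state = BLOCK if in_block else NORMAL
--         i = 0
--         while i < n:
--             if state == BLOCK:
--                 if s[i:i+2] == '*/':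
--                     state = NORMAL
--                     i += 2
--                 else:
--                     i += 1
--             elif state == STRING:
--                 if s[i] == '\\':
--                     i += 2
--                 elif s[i] == '"':
--                     state = NORMAL
--                     i += 1
--                 else:
--                     i += 1
--             elif state == TRIPLE:
--                 if s[i:i+3] == '"""':
--                     state = NORMAL
--                     i += 3
--                 elif s[i] == '\\':
--                     i += 2
--                 else:
--                     i += 1
--             else:
--                 if s[i:i+2] == '/*':
--                     state = BLOCK
--                     i += 2
--                 elif s[i:i+2] == '//':
--                     break
--                 elif s[i] == '"':
--                     if s[i:i+3] == '"""':
--                         state = TRIPLE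
--                         i += 3
--                     else:
--                         state = STRING
--                         i += 1
--                 elif s[i] == '{':
--                     depth += 1
--                     i += 1
--                 elif s[i] == '}':
--                     depth -= 1
--                     i += 1
--                 else:
--                     i += 1
--         in_block = (state == BLOCK)
--         depths.append(depth)
--     return depths
-- ===== Notes on version B (the rewrite author's own statement) =====
-- stated objective: alternative
-- what changed: Replaced A's nested inner while-loops that swallow regular strings, triple-quoted strings and comments by a single flat per-character loop driven by an explicit four-state machine (NORMAL/STRING/TRIPLE/BLOCK), with only the block-comment state carried across lines.
import Mathlib
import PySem

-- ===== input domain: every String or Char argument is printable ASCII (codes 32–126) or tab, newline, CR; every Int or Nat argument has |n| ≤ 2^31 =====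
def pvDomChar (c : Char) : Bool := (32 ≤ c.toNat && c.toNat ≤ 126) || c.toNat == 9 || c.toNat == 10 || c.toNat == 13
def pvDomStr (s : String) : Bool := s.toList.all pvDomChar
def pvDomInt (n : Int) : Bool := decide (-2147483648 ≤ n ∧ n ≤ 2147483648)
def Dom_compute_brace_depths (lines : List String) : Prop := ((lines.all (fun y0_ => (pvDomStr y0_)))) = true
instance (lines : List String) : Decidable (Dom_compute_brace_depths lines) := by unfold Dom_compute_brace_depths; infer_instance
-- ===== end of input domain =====

-- B replaces A's nested inner while-loops for strings and comments by one flat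
-- per-character loop driven by an explicit four-state machine; same results, same cost.

-- ===== PORT A =====
-- A's inner `while` swallowing a regular "..." string: returns the index after it.
-- (s[i:i+2] == 'xy' on a slice shorter than 2 is never equal, so the two-char
-- comparison is exactly `s[i]? = 'x' ∧ s[i+1]? = 'y'`; same for three chars.)
def skipStringA (s : List Char) (i : Nat) : Nat :=
  if i < s.length then
    if s[i]? == some '\\' then skipStringA s (i+2)
    else if s[i]? == some '"' then i+1
    else skipStringA s (i+1)
  else i
termination_by s.length - i

-- A's inner `while` swallowing a triple-quoted string body (after the opening """).
def skipTripleA (s : List Char) (i : Nat) : Nat :=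
  if i < s.length then
    if s[i]? == some '"' && s[i+1]? == some '"' && s[i+2]? == some '"' then i+3
    else if s[i]? == some '\\' then skipTripleA s (i+2)
    else skipTripleA s (i+1)
  else i
termination_by s.length - i

theorem skipStringA_le (s : List Char) (i : Nat) : i ≤ skipStringA s i := by
  fun_induction skipStringA s i <;> omega

theorem skipTripleA_le (s : List Char) (i : Nat) : i ≤ skipTripleA s i := by
  fun_induction skipTripleA s i <;> omega

-- A's outer per-line `while` loop: returns (depth, in_block_comment) at end of line.
def lineA (s : List Char) (i : Nat) (depth : Int) (inBlock : Bool) : Int × Bool :=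
  if i < s.length then
    if inBlock then
      if s[i]? == some '*' && s[i+1]? == some '/' then lineA s (i+2) depth false
      else lineA s (i+1) depth true
    else
      if s[i]? == some '/' && s[i+1]? == some '*' then lineA s (i+2) depth true
      else if s[i]? == some '/' && s[i+1]? == some '/' then (depth, false)
      else if s[i]? == some '"' then
        if s[i+1]? == some '"' && s[i+2]? == some '"' then
          lineA s (skipTripleA s (i+3)) depth false
        else lineA s (skipStringA s (i+1)) depth false
      else if s[i]? == some '{' then lineA s (i+1) (depth+1) false
      else if s[i]? == some '}' then lineA s (i+1) (depth-1) false
      else lineA s (i+1) depth false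
  else (depth, inBlock)
termination_by s.length - i
decreasing_by
  · omega
  · omega
  · omega
  · have := skipTripleA_le s (i+3); omega
  · have := skipStringA_le s (i+1); omega
  · omega
  · omega
  · omega

def compute_brace_depths (lines : List String) : List Int :=
  (lines.foldl
    (fun (acc : List Int × Int × Bool) line =>
      let r := lineA line.toList 0 acc.2.1 acc.2.2
      (acc.1 ++ [r.1], r.1, r.2))
    ([], 0, false)).1

-- ===== PORT B =====
inductive BSt where
  | normal | instr | triple | block
deriving DecidableEq, Repr

-- B's single flat per-line loop, dispatching on the explicit state.
def lineB (s : List Char) (i : Nat) (depth : Int) (st : BSt) : Int × BSt :=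
  if i < s.length then
    match st with
    | .block =>
        if s[i]? == some '*' && s[i+1]? == some '/' then lineB s (i+2) depth .normal
        else lineB s (i+1) depth .block
    | .instr =>
        if s[i]? == some '\\' then lineB s (i+2) depth .instr
        else if s[i]? == some '"' then lineB s (i+1) depth .normal
        else lineB s (i+1) depth .instr
    | .triple =>
        if s[i]? == some '"' && s[i+1]? == some '"' && s[i+2]? == some '"' then
          lineB s (i+3) depth .normal
        else if s[i]? == some '\\' then lineB s (i+2) depth .triple
        else lineB s (i+1) depth .triple
    | .normal =>
        if s[i]? == some '/' && s[i+1]? == some '*' then lineB s (i+2) depth .block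
        else if s[i]? == some '/' && s[i+1]? == some '/' then (depth, .normal)
        else if s[i]? == some '"' then
          if s[i+1]? == some '"' && s[i+2]? == some '"' then lineB s (i+3) depth .triple
          else lineB s (i+1) depth .instr
        else if s[i]? == some '{' then lineB s (i+1) (depth+1) .normal
        else if s[i]? == some '}' then lineB s (i+1) (depth-1) .normal
        else lineB s (i+1) depth .normal
  else (depth, st)
termination_by s.length - i

def compute_brace_depths_alt (lines : List String) : List Int :=
  (lines.foldl
    (fun (acc : List Int × Int × Bool) line =>
      let st0 : BSt := if acc.2.2 then .block else .normal
      let r := lineB line.toList 0 acc.2.1 st0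
      (acc.1 ++ [r.1], r.1, r.2 == BSt.block))
    ([], 0, false)).1

-- ===== PRECONDITION & SPEC =====
def Spec_compute_brace_depths (lines : List String) (out : List Int) : Prop := out = compute_brace_depths_alt lines
instance (lines : List String) (out : List Int) : Decidable (Spec_compute_brace_depths lines out) := by unfold Spec_compute_brace_depths; infer_instance

-- ===== CLAIM (what is proved, stated in full; the proofs are below) =====
def Claim_equal_compute_brace_depths : Prop := ∀ (lines : List String), Dom_compute_brace_depths lines → Spec_compute_brace_depths lines (compute_brace_depths lines)

-- ===== LEMMAS AND PROOFS =====

def stB (st : BSt) : Bool := st == BSt.block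

-- Joint simulation: B's flat state machine tracks A's nested loops, state by state.
theorem key (s : List Char) :
    ∀ n, ∀ i depth, s.length - i < n →
      (((lineB s i depth .normal).1 = (lineA s i depth false).1 ∧
        stB (lineB s i depth .normal).2 = (lineA s i depth false).2) ∧
       ((lineB s i depth .block).1 = (lineA s i depth true).1 ∧
        stB (lineB s i depth .block).2 = (lineA s i depth true).2) ∧
       ((lineB s i depth .instr).1 = (lineA s (skipStringA s i) depth false).1 ∧
        stB (lineB s i depth .instr).2 = (lineA s (skipStringA s i) depth false).2) ∧
       ((lineB s i depth .triple).1 = (lineA s (skipTripleA s i) depth false).1 ∧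
        stB (lineB s i depth .triple).2 = (lineA s (skipTripleA s i) depth false).2)) := by
  intro n
  induction n with
  | zero => intro i depth h; omega
  | succ n ih =>
    intro i depth h
    by_cases hi : i < s.length
    · -- i < s.length: dispatch exactly on the programs' branch conditions
      refine ⟨?_, ?_, ?_, ?_⟩
      · -- NORMAL state vs A with in_block = false
        by_cases h1 : (s[i]? == some '/' && s[i+1]? == some '*') = true
        · have hB : lineB s i depth .normal = lineB s (i+2) depth .block := by
            conv_lhs => rw [lineB]
            rw [if_pos hi]; show (if _ = true then _ else _) = _; rw [if_pos h1]
          have hA : lineA s i depth false = lineA s (i+2) depth true := by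
            conv_lhs => rw [lineA]
            rw [if_pos hi, if_neg Bool.false_ne_true]; show (if _ = true then _ else _) = _; rw [if_pos h1]
          rw [hB, hA]; exact (ih (i+2) depth (by omega)).2.1
        · by_cases h2 : (s[i]? == some '/' && s[i+1]? == some '/') = true
          · have hB : lineB s i depth .normal = (depth, .normal) := by
              conv_lhs => rw [lineB]
              rw [if_pos hi]; show (if _ = true then _ else _) = _
              rw [if_neg h1, if_pos h2]
            have hA : lineA s i depth false = (depth, false) := by
              conv_lhs => rw [lineA]
              rw [if_pos hi, if_neg Bool.false_ne_true]; show (if _ = true then _ else _) = _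
              rw [if_neg h1, if_pos h2]
            rw [hB, hA]; exact ⟨rfl, rfl⟩
          · by_cases h3 : (s[i]? == some '"') = true
            · by_cases h4 : (s[i+1]? == some '"' && s[i+2]? == some '"') = true
              · have hB : lineB s i depth .normal = lineB s (i+3) depth .triple := by
                  conv_lhs => rw [lineB]
                  rw [if_pos hi]; show (if _ = true then _ else _) = _
                  rw [if_neg h1, if_neg h2, if_pos h3, if_pos h4]
                have hA : lineA s i depth false = lineA s (skipTripleA s (i+3)) depth false := by
                  conv_lhs => rw [lineA]
                  rw [if_pos hi, if_neg Bool.false_ne_true]; show (if _ = true then _ else _) = _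
                  rw [if_neg h1, if_neg h2, if_pos h3, if_pos h4]
                rw [hB, hA]; exact (ih (i+3) depth (by omega)).2.2.2
              · have hB : lineB s i depth .normal = lineB s (i+1) depth .instr := by
                  conv_lhs => rw [lineB]
                  rw [if_pos hi]; show (if _ = true then _ else _) = _
                  rw [if_neg h1, if_neg h2, if_pos h3, if_neg h4]
                have hA : lineA s i depth false = lineA s (skipStringA s (i+1)) depth false := by
                  conv_lhs => rw [lineA]
                  rw [if_pos hi, if_neg Bool.false_ne_true]; show (if _ = true then _ else _) = _
                  rw [if_neg h1, if_neg h2, if_pos h3, if_neg h4]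
                rw [hB, hA]; exact (ih (i+1) depth (by omega)).2.2.1
            · by_cases h5 : (s[i]? == some '{') = true
              · have hB : lineB s i depth .normal = lineB s (i+1) (depth+1) .normal := by
                  conv_lhs => rw [lineB]
                  rw [if_pos hi]; show (if _ = true then _ else _) = _
                  rw [if_neg h1, if_neg h2, if_neg h3, if_pos h5]
                have hA : lineA s i depth false = lineA s (i+1) (depth+1) false := by
                  conv_lhs => rw [lineA]
                  rw [if_pos hi, if_neg Bool.false_ne_true]; show (if _ = true then _ else _) = _
                  rw [if_neg h1, if_neg h2, if_neg h3, if_pos h5]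
                rw [hB, hA]; exact (ih (i+1) (depth+1) (by omega)).1
              · by_cases h6 : (s[i]? == some '}') = true
                · have hB : lineB s i depth .normal = lineB s (i+1) (depth-1) .normal := by
                    conv_lhs => rw [lineB]
                    rw [if_pos hi]; show (if _ = true then _ else _) = _
                    rw [if_neg h1, if_neg h2, if_neg h3, if_neg h5, if_pos h6]
                  have hA : lineA s i depth false = lineA s (i+1) (depth-1) false := by
                    conv_lhs => rw [lineA]
                    rw [if_pos hi, if_neg Bool.false_ne_true]; show (if _ = true then _ else _) = _
                    rw [if_neg h1, if_neg h2, if_neg h3, if_neg h5, if_pos h6]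
                  rw [hB, hA]; exact (ih (i+1) (depth-1) (by omega)).1
                · have hB : lineB s i depth .normal = lineB s (i+1) depth .normal := by
                    conv_lhs => rw [lineB]
                    rw [if_pos hi]; show (if _ = true then _ else _) = _
                    rw [if_neg h1, if_neg h2, if_neg h3, if_neg h5, if_neg h6]
                  have hA : lineA s i depth false = lineA s (i+1) depth false := by
                    conv_lhs => rw [lineA]
                    rw [if_pos hi, if_neg Bool.false_ne_true]; show (if _ = true then _ else _) = _
                    rw [if_neg h1, if_neg h2, if_neg h3, if_neg h5, if_neg h6]
                  rw [hB, hA]; exact (ih (i+1) depth (by omega)).1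
      · -- BLOCK state vs A with in_block = true
        by_cases h1 : (s[i]? == some '*' && s[i+1]? == some '/') = true
        · have hB : lineB s i depth .block = lineB s (i+2) depth .normal := by
            conv_lhs => rw [lineB]
            rw [if_pos hi]; show (if _ = true then _ else _) = _; rw [if_pos h1]
          have hA : lineA s i depth true = lineA s (i+2) depth false := by
            conv_lhs => rw [lineA]
            rw [if_pos hi, if_pos rfl]; show (if _ = true then _ else _) = _; rw [if_pos h1]
          rw [hB, hA]; exact (ih (i+2) depth (by omega)).1
        · have hB : lineB s i depth .block = lineB s (i+1) depth .block := by
            conv_lhs => rw [lineB]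
            rw [if_pos hi]; show (if _ = true then _ else _) = _; rw [if_neg h1]
          have hA : lineA s i depth true = lineA s (i+1) depth true := by
            conv_lhs => rw [lineA]
            rw [if_pos hi, if_pos rfl]; show (if _ = true then _ else _) = _; rw [if_neg h1]
          rw [hB, hA]; exact (ih (i+1) depth (by omega)).2.1
      · -- STRING state vs A's inner regular-string loop
        by_cases h1 : (s[i]? == some '\\') = true
        · have hB : lineB s i depth .instr = lineB s (i+2) depth .instr := by
            conv_lhs => rw [lineB]
            rw [if_pos hi]; show (if _ = true then _ else _) = _; rw [if_pos h1]
          have hS : skipStringA s i = skipStringA s (i+2) := by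
            conv_lhs => rw [skipStringA]
            rw [if_pos hi]; show (if _ = true then _ else _) = _; rw [if_pos h1]
          rw [hB, hS]; exact (ih (i+2) depth (by omega)).2.2.1
        · by_cases h2 : (s[i]? == some '"') = true
          · have hB : lineB s i depth .instr = lineB s (i+1) depth .normal := by
              conv_lhs => rw [lineB]
              rw [if_pos hi]; show (if _ = true then _ else _) = _
              rw [if_neg h1, if_pos h2]
            have hS : skipStringA s i = i+1 := by
              conv_lhs => rw [skipStringA]
              rw [if_pos hi]; show (if _ = true then _ else _) = _
              rw [if_neg h1, if_pos h2]
            rw [hB, hS]; exact (ih (i+1) depth (by omega)).1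
          · have hB : lineB s i depth .instr = lineB s (i+1) depth .instr := by
              conv_lhs => rw [lineB]
              rw [if_pos hi]; show (if _ = true then _ else _) = _
              rw [if_neg h1, if_neg h2]
            have hS : skipStringA s i = skipStringA s (i+1) := by
              conv_lhs => rw [skipStringA]
              rw [if_pos hi]; show (if _ = true then _ else _) = _
              rw [if_neg h1, if_neg h2]
            rw [hB, hS]; exact (ih (i+1) depth (by omega)).2.2.1
      · -- TRIPLE state vs A's inner triple-quote loop
        by_cases h1 : (s[i]? == some '"' && s[i+1]? == some '"' && s[i+2]? == some '"') = true
        · have hB : lineB s i depth .triple = lineB s (i+3) depth .normal := by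
            conv_lhs => rw [lineB]
            rw [if_pos hi]; show (if _ = true then _ else _) = _; rw [if_pos h1]
          have hS : skipTripleA s i = i+3 := by
            conv_lhs => rw [skipTripleA]
            rw [if_pos hi]; show (if _ = true then _ else _) = _; rw [if_pos h1]
          rw [hB, hS]; exact (ih (i+3) depth (by omega)).1
        · by_cases h2 : (s[i]? == some '\\') = true
          · have hB : lineB s i depth .triple = lineB s (i+2) depth .triple := by
              conv_lhs => rw [lineB]
              rw [if_pos hi]; show (if _ = true then _ else _) = _
              rw [if_neg h1, if_pos h2]
            have hS : skipTripleA s i = skipTripleA s (i+2) := by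
              conv_lhs => rw [skipTripleA]
              rw [if_pos hi]; show (if _ = true then _ else _) = _
              rw [if_neg h1, if_pos h2]
            rw [hB, hS]; exact (ih (i+2) depth (by omega)).2.2.2
          · have hB : lineB s i depth .triple = lineB s (i+1) depth .triple := by
              conv_lhs => rw [lineB]
              rw [if_pos hi]; show (if _ = true then _ else _) = _
              rw [if_neg h1, if_neg h2]
            have hS : skipTripleA s i = skipTripleA s (i+1) := by
              conv_lhs => rw [skipTripleA]
              rw [if_pos hi]; show (if _ = true then _ else _) = _
              rw [if_neg h1, if_neg h2]
            rw [hB, hS]; exact (ih (i+1) depth (by omega)).2.2.2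
    · have hA0 : ∀ d b, lineA s i d b = (d, b) := by
        intro d b; rw [lineA, if_neg hi]
      have hB0 : ∀ d st, lineB s i d st = (d, st) := by
        intro d st; rw [lineB.eq_def, if_neg hi]
      have hS0 : skipStringA s i = i := by rw [skipStringA, if_neg hi]
      have hT0 : skipTripleA s i = i := by rw [skipTripleA, if_neg hi]
      simp [hB0, hS0, hT0, hA0, stB]

theorem perline (s : List Char) (depth : Int) (b : Bool) :
    (lineB s 0 depth (if b then .block else .normal)).1 = (lineA s 0 depth b).1 ∧
    stB (lineB s 0 depth (if b then .block else .normal)).2 = (lineA s 0 depth b).2 := by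
  have k := key s (s.length + 1) 0 depth (by omega)
  cases b <;> simp only [if_pos, if_neg, Bool.false_eq_true, not_false_iff] <;>
    [exact k.1; exact k.2.1]

theorem fold_eq (lines : List String) :
    ∀ (acc : List Int) (depth : Int) (b : Bool),
      (lines.foldl
        (fun (acc : List Int × Int × Bool) line =>
          let st0 : BSt := if acc.2.2 then .block else .normal
          let r := lineB line.toList 0 acc.2.1 st0
          (acc.1 ++ [r.1], r.1, r.2 == BSt.block)) (acc, depth, b)) =
      (lines.foldl
        (fun (acc : List Int × Int × Bool) line =>
          let r := lineA line.toList 0 acc.2.1 acc.2.2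
          (acc.1 ++ [r.1], r.1, r.2)) (acc, depth, b)) := by
  induction lines with
  | nil => intro acc depth b; rfl
  | cons l rest ih =>
    intro acc depth b
    have hp := perline l.toList depth b
    simp only [List.foldl_cons]
    rw [hp.1, show ((lineB l.toList 0 depth (if b then .block else .normal)).2 == BSt.block) =
          (lineA l.toList 0 depth b).2 from hp.2]
    exact ih _ _ _

-- ===== VERDICT (by name: the statement is the Claim_ definition above) =====
theorem compute_brace_depths_spec : Claim_equal_compute_brace_depths := by
  intro lines _
  unfold Spec_compute_brace_depths compute_brace_depths compute_brace_depths_alt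
  rw [fold_eq]
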